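-- pv_equiv track=rewrite | github.com/gka0903/Coding_Test | 문제/2022/2022.12/2022.12.03/종이 자르기.py | solution
-- ===== SOURCE A (Python) =====
-- def solution(M, N):
--     answer = 0
--     width = 0
--     vertical = 0
--     while M != 1:
--         answer += 1
--         width += 1
--         M -= 1
--     while N != 1:
--         vertical += 1
--         N -= 1
--     answer += vertical * (width + 1)
--     return answer
-- ===== SOURCE B (Python) =====
-- def solution(M, N):
--     # Closed form: cutting an M x N sheet into unit pieces takes M*N - 1 cuts.
--     return M * N - 1
-- ===== Notes on version B (the rewrite author's own statement) =====
-- stated objective: faster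
-- what changed: Replaced the two decrement-until-1 counting loops by the closed form M*N - 1.
import Mathlib
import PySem

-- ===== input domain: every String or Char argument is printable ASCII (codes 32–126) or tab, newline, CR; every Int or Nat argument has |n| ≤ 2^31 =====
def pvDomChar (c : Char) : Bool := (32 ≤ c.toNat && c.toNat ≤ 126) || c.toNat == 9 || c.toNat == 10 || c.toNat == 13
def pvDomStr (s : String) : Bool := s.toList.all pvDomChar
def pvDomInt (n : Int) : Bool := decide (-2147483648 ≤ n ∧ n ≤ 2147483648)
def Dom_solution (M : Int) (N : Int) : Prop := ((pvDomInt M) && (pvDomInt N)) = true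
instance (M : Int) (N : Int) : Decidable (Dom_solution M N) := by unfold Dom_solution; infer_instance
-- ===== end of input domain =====

-- B replaces A's two counting loops with the closed form M*N - 1 (asymptotically faster).

-- ===== PORT A =====
-- first while loop: increments answer and width while decrementing M (guard 'M != 1';
-- the 'M > 1' test only makes the recursion total — Python diverges for M < 1, excluded by Pre_)
def solLoop1 (M answer width : Int) : Int × Int :=
  if M > 1 then solLoop1 (M - 1) (answer + 1) (width + 1) else (answer, width)
termination_by (M - 1).toNat
decreasing_by omega

-- second while loop: increments vertical while decrementing N
def solLoop2 (N vertical : Int) : Int :=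
  if N > 1 then solLoop2 (N - 1) (vertical + 1) else vertical
termination_by (N - 1).toNat
decreasing_by omega

def solution (M : Int) (N : Int) : Int :=
  let p := solLoop1 M 0 0
  let answer := p.1
  let width := p.2
  let vertical := solLoop2 N 0
  answer + vertical * (width + 1)

-- ===== PORT B =====
def solution_alt (M : Int) (N : Int) : Int := M * N - 1

-- ===== PRECONDITION & SPEC =====
-- Pre_ excludes M < 1 or N < 1, where Python A's 'while M != 1' / 'while N != 1' loops never terminate.
def Pre_solution (M : Int) (N : Int) : Prop := 1 ≤ M ∧ 1 ≤ N
instance (M : Int) (N : Int) : Decidable (Pre_solution M N) := by unfold Pre_solution; infer_instance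
def pvWitness_solution : Int × Int := (3, 4)

def Spec_solution (M : Int) (N : Int) (out : Int) : Prop := out = solution_alt M N
instance (M : Int) (N : Int) (out : Int) : Decidable (Spec_solution M N out) := by unfold Spec_solution; infer_instance

-- ===== CLAIM (what is proved, stated in full; the proofs are below) =====
def Claim_equal_solution : Prop := ∀ (M : Int) (N : Int), Dom_solution M N → Pre_solution M N → Spec_solution M N (solution M N)

-- ===== LEMMAS AND PROOFS =====
theorem solLoop1_eq (M answer width : Int) (h : 1 ≤ M) :
    solLoop1 M answer width = (answer + (M - 1), width + (M - 1)) := by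
  induction M, answer, width using solLoop1.induct with
  | case1 M answer width hgt ih =>
    rw [solLoop1, if_pos hgt, ih (by omega)]
    have e1 : answer + 1 + (M - 1 - 1) = answer + (M - 1) := by ring
    have e2 : width + 1 + (M - 1 - 1) = width + (M - 1) := by ring
    rw [e1, e2]
  | case2 M answer width hle =>
    rw [solLoop1, if_neg hle]
    have : M = 1 := by omega
    simp [this]

theorem solLoop2_eq (N vertical : Int) (h : 1 ≤ N) :
    solLoop2 N vertical = vertical + (N - 1) := by
  induction N, vertical using solLoop2.induct with
  | case1 N vertical hgt ih =>
    rw [solLoop2, if_pos hgt, ih (by omega)]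
    ring
  | case2 N vertical hle =>
    rw [solLoop2, if_neg hle]
    have : N = 1 := by omega
    simp [this]

-- ===== VERDICT (by name: the statement is the Claim_ definition above) =====
theorem solution_spec : Claim_equal_solution := by
  intro M N _ ⟨hM, hN⟩
  show solution M N = solution_alt M N
  simp only [solution, solution_alt, solLoop1_eq M 0 0 hM, solLoop2_eq N 0 hN]
  ring
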